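-- pv_equiv track=rewrite | github.com/pypi-data/pypi-mirror-374 | packages/folio-uuid/folio_uuid-1.0.0.tar.gz/folio_uuid-1.0.0/src/folio_uuid/folio_uuid.py | calculate_sierra_check_digit
-- ===== SOURCE A (Python) =====
-- import math
--
-- def calculate_sierra_check_digit(record_number: int) -> str:
--     """Rewritten to python from
--     https://github.com/SydneyUniLibrary/sierra-record-check-digit/blob/master/index.js"""
--     m = 2
--     x = 0
--     i = record_number
--     while i > 0:
--         a = i % 10
--         i = math.floor(i / 10)
--         x += a * m
--         m += 1
--     r = x % 11
--     return "x" if r == 10 else str(r)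
-- ===== SOURCE B (Python) =====
-- def calculate_sierra_check_digit(record_number: int) -> str:
--     """Check digit via nested digit sums: the position weight k+2 of each digit
--     never appears; instead x = digit_sum(n) + sum of digit_sum over all tails n//10^j."""
--     def digit_sum(n):
--         t = 0
--         while n > 0:
--             t += n % 10
--             n //= 10
--         return t
--     x = digit_sum(record_number)
--     n = record_number
--     while n > 0:
--         x += digit_sum(n)
--         n //= 10
--     r = x % 11
--     return "x" if r == 10 else str(r)
-- ===== Notes on version B (the rewrite author's own statement) =====
-- stated objective: alternative
-- what changed: Replaces the single loop that carries an explicit position multiplier with nested digit sums: x = digit_sum(n) plus the digit sums of all tails obtained by repeatedly dropping the last digit; no weight variable is maintained.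
import Mathlib
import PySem

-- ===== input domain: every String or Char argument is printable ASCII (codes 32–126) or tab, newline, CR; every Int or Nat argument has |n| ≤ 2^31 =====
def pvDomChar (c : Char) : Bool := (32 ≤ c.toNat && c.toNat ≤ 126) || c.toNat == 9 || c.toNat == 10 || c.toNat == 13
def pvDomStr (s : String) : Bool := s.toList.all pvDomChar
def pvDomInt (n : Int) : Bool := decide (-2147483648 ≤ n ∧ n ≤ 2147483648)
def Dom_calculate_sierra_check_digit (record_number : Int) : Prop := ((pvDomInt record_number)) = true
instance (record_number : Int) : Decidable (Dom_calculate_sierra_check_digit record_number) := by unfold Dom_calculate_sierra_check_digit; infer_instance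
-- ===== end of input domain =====

-- B computes the same weighted check-digit sum by nested digit sums instead of a position multiplier; alternative decomposition, same result.

-- ===== PORT A =====
-- termination helper for A's loop (cited by decreasing_by)
theorem pvFloordivTen_lt (i : Int) (h : 0 < i) : (PySem.Int.floordiv i 10).toNat < i.toNat := by
  rw [PySem.Int.floordiv_eq_ediv_of_pos (by omega)]
  omega

-- A's while loop: state (i, m, x).  math.floor(i / 10) equals i // 10 exactly for
-- 0 < i ≤ 2^31 (the float quotient is never within rounding distance of the next integer),
-- so it is ported as floor division.
def pvLoopA (i m x : Int) : Int :=
  if h : i > 0 then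
    pvLoopA (PySem.Int.floordiv i 10) (m + 1) (x + PySem.Int.mod i 10 * m)
  else x
termination_by i.toNat
decreasing_by exact pvFloordivTen_lt i h

def calculate_sierra_check_digit (record_number : Int) : String :=
  let x := pvLoopA record_number 2 0
  let r := PySem.Int.mod x 11
  if r == 10 then "x" else PySem.Int.toStr r

-- ===== PORT B =====
-- digit_sum helper of Source B
def pvDigitSum (n : Int) : Int :=
  if h : n > 0 then PySem.Int.mod n 10 + pvDigitSum (PySem.Int.floordiv n 10)
  else 0
termination_by n.toNat
decreasing_by exact pvFloordivTen_lt n h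

-- Source B's while loop adding digit_sum(n) for every tail n, n//10, n//100, …
def pvTailSums (n : Int) : Int :=
  if h : n > 0 then pvDigitSum n + pvTailSums (PySem.Int.floordiv n 10)
  else 0
termination_by n.toNat
decreasing_by exact pvFloordivTen_lt n h

def calculate_sierra_check_digit_alt (record_number : Int) : String :=
  let x := pvDigitSum record_number + pvTailSums record_number
  let r := PySem.Int.mod x 11
  if r == 10 then "x" else PySem.Int.toStr r

-- ===== PRECONDITION & SPEC =====
def Spec_calculate_sierra_check_digit (record_number : Int) (out : String) : Prop := out = calculate_sierra_check_digit_alt record_number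
instance (record_number : Int) (out : String) : Decidable (Spec_calculate_sierra_check_digit record_number out) := by unfold Spec_calculate_sierra_check_digit; infer_instance

-- ===== CLAIM (what is proved, stated in full; the proofs are below) =====
def Claim_equal_calculate_sierra_check_digit : Prop := ∀ (record_number : Int), Dom_calculate_sierra_check_digit record_number → Spec_calculate_sierra_check_digit record_number (calculate_sierra_check_digit record_number)

-- ===== LEMMAS AND PROOFS =====

theorem pvDigitSum_nonpos {n : Int} (h : ¬ n > 0) : pvDigitSum n = 0 := by
  rw [pvDigitSum]; simp [h]

theorem pvTailSums_nonpos {n : Int} (h : ¬ n > 0) : pvTailSums n = 0 := by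
  rw [pvTailSums]; simp [h]

-- invariant of A's loop: the multiplier m distributes into digit sums of the tails
theorem pvDigitSum_pos {n : Int} (h : n > 0) :
    pvDigitSum n = PySem.Int.mod n 10 + pvDigitSum (PySem.Int.floordiv n 10) := by
  rw [pvDigitSum]; simp [h]

theorem pvTailSums_pos {n : Int} (h : n > 0) :
    pvTailSums n = pvDigitSum n + pvTailSums (PySem.Int.floordiv n 10) := by
  rw [pvTailSums]; simp [h]

theorem pvFloordivTen_nonpos {n : Int} (h : ¬ n > 0) : ¬ PySem.Int.floordiv n 10 > 0 := by
  rw [PySem.Int.floordiv_eq_ediv_of_pos (show (0:Int) < 10 by omega)]; omega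

theorem pvLoopA_eq (i : Int) : ∀ m x : Int,
    pvLoopA i m x = x + m * pvDigitSum i + pvTailSums (PySem.Int.floordiv i 10) := by
  induction i using (WellFounded.induction (measure (fun i : Int => i.toNat)).wf) with
  | _ i ih =>
    intro m x
    by_cases h : i > 0
    · have hlt := pvFloordivTen_lt i h
      rw [pvLoopA]
      simp only [h, dite_true]
      rw [ih _ hlt, pvDigitSum_pos h]
      by_cases h' : PySem.Int.floordiv i 10 > 0
      · rw [pvTailSums_pos h', pvDigitSum_pos h']
        ring
      · rw [pvDigitSum_nonpos h', pvTailSums_nonpos h',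
            pvTailSums_nonpos (pvFloordivTen_nonpos h')]
        ring
    · rw [pvLoopA]
      simp only [h, dite_false]
      rw [pvDigitSum_nonpos h, pvTailSums_nonpos (pvFloordivTen_nonpos h)]
      ring

theorem pvX_eq (n : Int) :
    pvLoopA n 2 0 = pvDigitSum n + pvTailSums n := by
  rw [pvLoopA_eq]
  by_cases h : n > 0
  · rw [pvTailSums_pos h]; ring
  · rw [pvDigitSum_nonpos h, pvTailSums_nonpos h,
        pvTailSums_nonpos (pvFloordivTen_nonpos h)]
    ring

-- ===== VERDICT (by name: the statement is the Claim_ definition above) =====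
theorem calculate_sierra_check_digit_spec : Claim_equal_calculate_sierra_check_digit := by
  intro n _
  unfold Spec_calculate_sierra_check_digit calculate_sierra_check_digit calculate_sierra_check_digit_alt
  rw [pvX_eq]
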